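-- pv_equiv track=rewrite | github.com/Wiktor2013/cwiczenia | analityk_edu_pl/litery_funkcje.py | licznik_tekstowy
-- ===== SOURCE A (Python) =====
-- def licznik_tekstowy(t):
--     linie = 0
--     slowa = 0
--     litery = 0
--     slownik = {}
--
--     for x in t:  # iteruje po liniach
--         linie += 1  # licznik zwieksza swoja wartosc o numer kolejnej linii
--         ilosc_wyrazow = len(x.split(" "))  # rozdzielam linie na podstawie znaku spacji licze elementy po podzieleniu
--         slowa += ilosc_wyrazow # do zmiennej slowa dodaje liczbe elementow z poprzedniej linii
--         for char in x: # iteruje po znakach w elementach linii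
--             char = char.lower() # zmieniam na male litery
--             if char != " ":
--                 litery += 1
--             if char in slownik:
--                 slownik[char] += 1
--             else:
--                 slownik[char] = 1
--
--     return linie, slowa, litery, slownik
-- ===== SOURCE B (Python) =====
-- def licznik_tekstowy(t):
--     linie = len(t)
--     slowa = sum(len(x.split(" ")) for x in t)
--     chars = "".join(t).lower()
--     litery = len(chars) - chars.count(" ")
--     slownik = {c: chars.count(c) for c in dict.fromkeys(chars)}
--     return linie, slowa, litery, slownik
-- ===== Notes on version B (the rewrite author's own statement) =====
-- stated objective: alternative
-- what changed: The single accumulating nested loop is replaced by staged whole-text passes: len(t), a sum comprehension for words, join+lower the whole text once, litery as length minus space count, and the frequency dict built by a counting dict comprehension (str.count per distinct character) over dict.fromkeys of the text. The per-character work moves from the Python-level inner loop into C-level str.join/lower/count calls.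
import Mathlib
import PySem

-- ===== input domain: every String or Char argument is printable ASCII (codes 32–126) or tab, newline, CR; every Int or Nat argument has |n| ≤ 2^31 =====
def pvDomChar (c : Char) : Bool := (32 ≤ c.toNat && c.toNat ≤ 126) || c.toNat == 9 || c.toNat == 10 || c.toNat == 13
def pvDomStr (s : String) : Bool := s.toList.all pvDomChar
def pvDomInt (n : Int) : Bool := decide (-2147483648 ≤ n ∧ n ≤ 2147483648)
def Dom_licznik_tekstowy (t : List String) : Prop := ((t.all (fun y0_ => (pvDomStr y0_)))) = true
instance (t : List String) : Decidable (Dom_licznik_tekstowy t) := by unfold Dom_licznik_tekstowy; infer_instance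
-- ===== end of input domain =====

-- B replaces A's single accumulating pass with staged whole-text passes: len / a sum
-- comprehension / join+lower, then a counting dict comprehension over the deduplicated
-- characters.  Objective: alternative decomposition; a timing run measured B faster (constant factor).

-- ===== PORT A =====
-- A's inner loop body: per character, bump litery (unless space) and the dict entry
def licznik_tekstowy_inner (p : Int × PySem.Dict String Int) (ch : Char) :
    Int × PySem.Dict String Int :=
  let char := PySem.Str.lower (String.singleton ch)
  let litery := if char ≠ " " then p.1 + 1 else p.1
  let slownik := if p.2.contains char then p.2.insert char (p.2.getD char 0 + 1)
                 else p.2.insert char 1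
  (litery, slownik)

-- A's outer loop body: per line, bump linie, add the split word count, run the inner loop
def licznik_tekstowy_step (st : Int × Int × Int × PySem.Dict String Int) (x : String) :
    Int × Int × Int × PySem.Dict String Int :=
  let linie := st.1 + 1
  let ilosc_wyrazow : Int := (PySem.Chars.splitOn x.toList [' ']).length
  let slowa := st.2.1 + ilosc_wyrazow
  let inner := x.toList.foldl licznik_tekstowy_inner (st.2.2.1, st.2.2.2)
  (linie, slowa, inner.1, inner.2)

def licznik_tekstowy (t : List String) : Int × Int × Int × (List (String × Int)) :=
  let fin := t.foldl licznik_tekstowy_step (0, 0, 0, PySem.Dict.empty)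
  (fin.1, fin.2.1, fin.2.2.1, fin.2.2.2.items)

-- ===== PORT B =====
-- linie = len(t); slowa = sum(len(x.split(" ")) for x in t);
-- chars = "".join(t).lower(); litery = len(chars) - chars.count(" ");
-- slownik = {c: chars.count(c) for c in dict.fromkeys(chars)}
-- (str.count with a 1-character needle is the character count: ported as List.count;
--  dict.fromkeys as ordered dedup is PySem.List.dedup)
def licznik_tekstowy_alt (t : List String) : Int × Int × Int × (List (String × Int)) :=
  let linie : Int := t.length
  let slowa : Int := (t.map (fun x => ((PySem.Chars.splitOn x.toList [' ']).length : Int))).sum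
  let chars : List Char := PySem.Chars.lower (t.flatMap String.toList)
  let litery : Int := (chars.length : Int) - (chars.count ' ' : Int)
  let slownik := (PySem.List.dedup chars).map (fun c => (String.singleton c, (chars.count c : Int)))
  (linie, slowa, litery, slownik)

-- ===== PRECONDITION & SPEC =====
def Spec_licznik_tekstowy (t : List String) (out : Int × Int × Int × (List (String × Int))) : Prop := out = licznik_tekstowy_alt t
instance (t : List String) (out : Int × Int × Int × (List (String × Int))) : Decidable (Spec_licznik_tekstowy t out) := by unfold Spec_licznik_tekstowy; infer_instance

-- ===== CLAIM (what is proved, stated in full; the proofs are below) =====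
def Claim_equal_licznik_tekstowy : Prop := ∀ (t : List String), Dom_licznik_tekstowy t → Spec_licznik_tekstowy t (licznik_tekstowy t)

-- ===== LEMMAS AND PROOFS =====

-- lowercase of a single character, as the (1-char) String key A's loop uses
def pvLow (ch : Char) : String := PySem.Str.lower (String.singleton ch)

-- the dict update A's branch amounts to
def pvIns (d : PySem.Dict String Int) (c : String) : PySem.Dict String Int :=
  d.insert c (d.getD c 0 + 1)

-- all lowered characters of the text (as 1-char strings), in order
def pvFlat (t : List String) : List String := t.flatMap (fun x => x.toList.map pvLow)

def pvWords (t : List String) : Int :=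
  (t.map (fun x => ((PySem.Chars.splitOn x.toList [' ']).length : Int))).sum

theorem pv_low_eq (ch : Char) : pvLow ch = String.singleton (PySem.Chars.lowerChar ch) := by
  simp [pvLow, PySem.Str.lower, PySem.Chars.lower, String.singleton_eq_ofList]

theorem pv_singleton_inj : Function.Injective String.singleton := by
  intro a b h
  have h2 := congrArg String.toList h
  simpa using h2

theorem pv_branch (d : PySem.Dict String Int) (c : String) :
    (if d.contains c then d.insert c (d.getD c 0 + 1) else d.insert c 1) = pvIns d c := by
  by_cases h : d.contains c
  · simp [pvIns, h]
  · have h' : d.contains c = false := by simpa using h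
    simp [pvIns, h', PySem.Dict.getD_of_not_contains d 0 h']

theorem pv_innerA (l : List Char) (lit : Int) (d : PySem.Dict String Int) :
    l.foldl licznik_tekstowy_inner (lit, d)
    = (lit + ((l.map pvLow).countP (fun c => !(c == " ")) : Int),
       (l.map pvLow).foldl pvIns d) := by
  induction l generalizing lit d with
  | nil => simp
  | cons ch l ih =>
    simp only [List.foldl_cons, List.map_cons, List.countP_cons]
    rw [show licznik_tekstowy_inner (lit, d) ch
        = ((if pvLow ch ≠ " " then lit + 1 else lit), pvIns d (pvLow ch)) from by
      unfold licznik_tekstowy_inner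
      simp only []
      rw [pv_branch]
      simp only [pvLow]
      rfl]
    rw [ih, Prod.mk.injEq]
    refine ⟨?_, rfl⟩
    by_cases h : pvLow ch = " "
    · simp [h]
    · simp [h]
      ring

theorem pv_outerA (t : List String) (a b lit : Int) (d : PySem.Dict String Int) :
    t.foldl licznik_tekstowy_step (a, b, lit, d)
    = (a + t.length, b + pvWords t,
       lit + ((pvFlat t).countP (fun c => !(c == " ")) : Int),
       (pvFlat t).foldl pvIns d) := by
  induction t generalizing a b lit d with
  | nil => simp [pvWords, pvFlat]
  | cons x t ih =>
    simp only [List.foldl_cons]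
    rw [show licznik_tekstowy_step (a, b, lit, d) x
        = (a + 1, b + ((PySem.Chars.splitOn x.toList [' ']).length : Int),
           lit + ((x.toList.map pvLow).countP (fun c => !(c == " ")) : Int),
           (x.toList.map pvLow).foldl pvIns d) from by
      unfold licznik_tekstowy_step
      simp only []
      rw [pv_innerA]]
    rw [ih]
    simp only [pvFlat, pvWords, List.flatMap_cons, List.map_cons, List.sum_cons,
      List.countP_append, List.foldl_append, List.length_cons]
    rw [Prod.mk.injEq, Prod.mk.injEq, Prod.mk.injEq]
    refine ⟨by push_cast; ring, by ring, by push_cast; ring, rfl⟩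

theorem pv_dict_eq (M : List String) :
    M.foldl pvIns PySem.Dict.empty = PySem.Dict.counter M :=
  PySem.Dict.foldl_insert_getD_add_one_eq_counter M

-- A's key stream = the lowered character stream, mapped through String.singleton
theorem pv_flat_eq (t : List String) :
    pvFlat t = (PySem.Chars.lower (t.flatMap String.toList)).map String.singleton := by
  simp only [pvFlat, PySem.Chars.lower, List.map_flatMap, List.map_map]
  refine List.flatMap_congr ?_
  intro x _
  refine List.map_congr_left fun ch _ => ?_
  exact pv_low_eq ch

-- Set.ofList commutes with an injective map
theorem pv_foldl_add_map {α β : Type} [DecidableEq α] [DecidableEq β]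
    (f : α → β) (hf : Function.Injective f) (xs : List α) (s : List α) :
    (xs.map f).foldl PySem.Set.add (s.map f) = (xs.foldl PySem.Set.add s).map f := by
  induction xs generalizing s with
  | nil => simp
  | cons x xs ih =>
    simp only [List.map_cons, List.foldl_cons]
    rw [show PySem.Set.add (s.map f) (f x) = (PySem.Set.add s x).map f from by
      by_cases h : x ∈ s
      · simp [PySem.Set.add, h, List.mem_map_of_injective hf]
      · simp [PySem.Set.add, h, List.mem_map_of_injective hf]]
    exact ih _

theorem pv_ofList_map {α β : Type} [DecidableEq α] [DecidableEq β]
    (f : α → β) (hf : Function.Injective f) (xs : List α) :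
    PySem.Set.ofList (xs.map f) = (PySem.Set.ofList xs).map f := by
  rw [PySem.Set.ofList_eq_foldl, PySem.Set.ofList_eq_foldl]
  simpa using pv_foldl_add_map f hf xs []

-- non-space count = length minus space count
theorem pv_countP_eq {α : Type} [DecidableEq α] (v : α) (M : List α) :
    ((M.countP (fun c => !(c == v)) : Nat) : Int)
      = (M.length : Int) - (List.count v M : Int) := by
  have h : M.countP (fun c => !(c == v)) + List.count v M = M.length := by
    induction M with
    | nil => simp
    | cons a M ih =>
      simp only [List.countP_cons, List.count_cons, List.length_cons]
      by_cases h : a == v <;> simp [h] <;> omega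
  omega

-- ===== VERDICT (by name: the statement is the Claim_ definition above) =====
theorem licznik_tekstowy_spec : Claim_equal_licznik_tekstowy := by
  intro t _
  unfold Spec_licznik_tekstowy licznik_tekstowy licznik_tekstowy_alt
  simp only []
  rw [pv_outerA]
  set chars : List Char := PySem.Chars.lower (t.flatMap String.toList) with hchars
  have hM : pvFlat t = chars.map String.singleton := pv_flat_eq t
  rw [Prod.mk.injEq, Prod.mk.injEq, Prod.mk.injEq]
  refine ⟨by ring, by simp [pvWords], ?_, ?_⟩
  · -- litery
    rw [hM, pv_countP_eq " " (chars.map String.singleton)]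
    have hcnt : List.count " " (chars.map String.singleton) = chars.count ' ' := by
      rw [show (" " : String) = String.singleton ' ' from rfl]
      exact List.count_map_of_injective chars String.singleton pv_singleton_inj ' '
    rw [hcnt]
    simp
  · -- slownik
    rw [hM, pv_dict_eq, PySem.Dict.items_counter,
      pv_ofList_map String.singleton pv_singleton_inj chars,
      ← PySem.List.dedup_eq_ofList, List.map_map]
    refine List.map_congr_left fun c _ => ?_
    simp only [Function.comp_apply, Prod.mk.injEq, true_and]
    norm_cast
    exact List.count_map_of_injective chars String.singleton pv_singleton_inj c
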